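-- pv_equiv track=rewrite | github.com/samterry1995/three_two_six | proj_9/arithmetic.py | left_compute
-- ===== SOURCE A (Python) =====
-- def left_compute(op_string, numbers):
--     i=0
--     value = numbers[i]
--     for op in op_string:
--         if op == "+":
--             i+=1
--             value = value + numbers[i]
--         elif op == "*":
--             i+=1
--             value = value * numbers[i]
--     node_value = value
--     return node_value
-- ===== SOURCE B (Python) =====
-- def left_compute(op_string, numbers):
--     # Distributive right-to-left pass: the left-to-right result equals
--     # numbers[0] times the product of all '*' operands, plus each '+'
--     # operand times the product of the '*' operands to its right.
--     ops = [o for o in op_string if o in ('+', '*')]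
--     suffix = 1
--     total = 0
--     idx = len(ops)
--     for op in reversed(ops):
--         n = numbers[idx]
--         idx -= 1
--         if op == '*':
--             suffix *= n
--         else:
--             total += n * suffix
--     return total + numbers[0] * suffix
-- ===== Notes on version B (the rewrite author's own statement) =====
-- stated objective: alternative
-- what changed: Replaces A's left-to-right fold with a distributive right-to-left pass: it accumulates a running suffix product of the '*' operands and sums each '+' operand times that suffix, returning total + numbers[0]*suffix; correctness rests on distributing multiplication over the earlier additions.
import Mathlib
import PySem

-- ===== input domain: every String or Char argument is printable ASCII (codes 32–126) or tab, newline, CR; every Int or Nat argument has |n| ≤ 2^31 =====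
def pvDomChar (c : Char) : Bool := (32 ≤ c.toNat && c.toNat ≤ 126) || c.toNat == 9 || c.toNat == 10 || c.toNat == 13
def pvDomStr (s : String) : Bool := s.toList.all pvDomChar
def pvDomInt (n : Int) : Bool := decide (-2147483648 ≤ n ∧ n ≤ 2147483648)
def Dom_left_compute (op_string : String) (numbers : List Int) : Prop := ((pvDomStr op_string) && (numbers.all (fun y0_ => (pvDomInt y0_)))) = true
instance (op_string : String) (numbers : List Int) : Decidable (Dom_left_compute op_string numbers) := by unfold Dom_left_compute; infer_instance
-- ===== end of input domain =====

-- B replaces A's left-to-right fold with a distributive right-to-left pass over the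
-- operators (suffix product of '*' operands plus weighted sum of '+' operands).
-- ===== PORT A =====
def left_compute (op_string : String) (numbers : List Int) : Int :=
  (op_string.toList.foldl
    (fun (st : Int × Int) op =>
      if op = '+' then (st.1 + 1, st.2 + PySem.List.pyGetD numbers (st.1 + 1) 0)
      else if op = '*' then (st.1 + 1, st.2 * PySem.List.pyGetD numbers (st.1 + 1) 0)
      else st)
    (0, PySem.List.pyGetD numbers 0 0)).2

-- ===== PORT B =====
def left_compute_alt (op_string : String) (numbers : List Int) : Int :=
  let ops := op_string.toList.filter (fun o => o == '+' || o == '*')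
  let r := ops.reverse.foldl
    (fun (st : Int × Int × Int) op =>
      let n := PySem.List.pyGetD numbers st.1 0
      (st.1 - 1,
       if op = '*' then st.2.1 * n else st.2.1,
       if op = '*' then st.2.2 else st.2.2 + n * st.2.1))
    ((ops.length : Int), 1, 0)
  r.2.2 + PySem.List.pyGetD numbers 0 0 * r.2.1

-- ===== PRECONDITION & SPEC =====
-- Pre_ excludes exactly the inputs where Python A raises IndexError: an empty numbers list,
-- or fewer than (number of '+'/'*' operators) + 1 numbers.
def Pre_left_compute (op_string : String) (numbers : List Int) : Prop :=
  numbers ≠ [] ∧ (op_string.toList.countP (fun o => o == '+' || o == '*')) < numbers.length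
instance (op_string : String) (numbers : List Int) : Decidable (Pre_left_compute op_string numbers) := by unfold Pre_left_compute; infer_instance
def pvWitness_left_compute : String × List Int := ("+x*", [2, 3, 4])

def Spec_left_compute (op_string : String) (numbers : List Int) (out : Int) : Prop := out = left_compute_alt op_string numbers
instance (op_string : String) (numbers : List Int) (out : Int) : Decidable (Spec_left_compute op_string numbers out) := by unfold Spec_left_compute; infer_instance

-- ===== CLAIM (what is proved, stated in full; the proofs are below) =====
def Claim_equal_left_compute : Prop := ∀ (op_string : String) (numbers : List Int), Dom_left_compute op_string numbers → Pre_left_compute op_string numbers → Spec_left_compute op_string numbers (left_compute op_string numbers)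

-- ===== LEMMAS AND PROOFS =====

-- B's step, abbreviated for the lemmas (identical to the lambda in left_compute_alt).
def pvStepB (numbers : List Int) (st : Int × Int × Int) (op : Char) : Int × Int × Int :=
  (st.1 - 1,
   if op = '*' then st.2.1 * PySem.List.pyGetD numbers st.1 0 else st.2.1,
   if op = '*' then st.2.2 else st.2.2 + PySem.List.pyGetD numbers st.1 0 * st.2.1)

-- The index component of B's right-to-left fold just counts down.
theorem pvStepB_idx (numbers : List Int) : ∀ (F : List Char) (a s t : Int),
    (F.foldr (fun op st => pvStepB numbers st op) (a, s, t)).1 = a - F.length := by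
  intro F
  induction F with
  | nil => intro a s t; simp
  | cons c F ih =>
    intro a s t
    rw [List.foldr_cons]
    rcases h : F.foldr (fun op st => pvStepB numbers st op) (a, s, t) with ⟨i, s', t'⟩
    have hthis := ih a s t
    rw [h] at hthis
    simp only at hthis
    simp only [pvStepB, List.length_cons]
    push_cast
    omega

-- Distributivity invariant: A's left fold from state (i, v) equals B's right-to-left
-- suffix-product fold over the filtered operators starting at index i + #ops.
theorem pv_left_key (numbers : List Int) : ∀ (cs : List Char) (i v : Int),
    (cs.foldl
      (fun (st : Int × Int) op =>
        if op = '+' then (st.1 + 1, st.2 + PySem.List.pyGetD numbers (st.1 + 1) 0)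
        else if op = '*' then (st.1 + 1, st.2 * PySem.List.pyGetD numbers (st.1 + 1) 0)
        else st)
      (i, v)).2
    = ((cs.filter (fun o => o == '+' || o == '*')).foldr (fun op st => pvStepB numbers st op)
         ((i + ((cs.filter (fun o => o == '+' || o == '*')).length : Int)), 1, 0)).2.2
      + v * ((cs.filter (fun o => o == '+' || o == '*')).foldr (fun op st => pvStepB numbers st op)
         ((i + ((cs.filter (fun o => o == '+' || o == '*')).length : Int)), 1, 0)).2.1 := by
  intro cs
  induction cs with
  | nil => intro i v; simp
  | cons c cs ih =>
    intro i v
    by_cases h1 : c = '+'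
    · subst h1
      simp only [List.foldl_cons, List.filter_cons, if_pos]
      have hf : ('+' == '+' || '+' == '*') = true := by decide
      simp only [hf, if_true]
      rw [ih (i + 1)]
      simp only [List.foldr_cons]
      rcases hr : (cs.filter (fun o => o == '+' || o == '*')).foldr
          (fun op st => pvStepB numbers st op)
          ((i + 1 + ((cs.filter (fun o => o == '+' || o == '*')).length : Int)), 1, 0)
        with ⟨j, sf, tt⟩
      have hj : j = i + 1 := by
        have := pvStepB_idx numbers (cs.filter (fun o => o == '+' || o == '*'))
          ((i + 1 + ((cs.filter (fun o => o == '+' || o == '*')).length : Int))) 1 0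
        rw [hr] at this; simp at this; omega
      subst hj
      simp only [List.length_cons]
      have harg : (i + ((cs.filter (fun o => o == '+' || o == '*')).length + 1 : ℕ) : Int)
          = i + 1 + ((cs.filter (fun o => o == '+' || o == '*')).length : Int) := by
        push_cast; ring
      rw [harg, hr]
      simp [pvStepB]
      ring
    · by_cases h2 : c = '*'
      · subst h2
        simp only [List.foldl_cons, List.filter_cons]
        have hf : ('*' == '+' || '*' == '*') = true := by decide
        simp only [hf, if_true, if_neg (by decide : ¬ ('*' : Char) = '+')]
        rw [ih (i + 1)]
        simp only [List.foldr_cons]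
        rcases hr : (cs.filter (fun o => o == '+' || o == '*')).foldr
            (fun op st => pvStepB numbers st op)
            ((i + 1 + ((cs.filter (fun o => o == '+' || o == '*')).length : Int)), 1, 0)
          with ⟨j, sf, tt⟩
        have hj : j = i + 1 := by
          have := pvStepB_idx numbers (cs.filter (fun o => o == '+' || o == '*'))
            ((i + 1 + ((cs.filter (fun o => o == '+' || o == '*')).length : Int))) 1 0
          rw [hr] at this; simp at this; omega
        subst hj
        simp only [List.length_cons]
        have harg : (i + ((cs.filter (fun o => o == '+' || o == '*')).length + 1 : ℕ) : Int)
            = i + 1 + ((cs.filter (fun o => o == '+' || o == '*')).length : Int) := by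
          push_cast; ring
        rw [harg, hr]
        simp [pvStepB]
        ring
      · have hf : (c == '+' || c == '*') = false := by
          simp [h1, h2]
        simp only [List.foldl_cons, if_neg h1, if_neg h2, List.filter_cons, hf]
        exact ih i v

-- ===== VERDICT (by name: the statement is the Claim_ definition above) =====
theorem left_compute_spec : Claim_equal_left_compute := by
  intro op_string numbers _ _
  unfold Spec_left_compute left_compute left_compute_alt
  simp only [List.foldl_reverse]
  have h := pv_left_key numbers op_string.toList 0 (PySem.List.pyGetD numbers 0 0)
  simp only [zero_add] at h
  rw [h]
  simp only [pvStepB]
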